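-- pv_equiv track=rewrite | github.com/mistwave/leetcode | Python3/no36_Valid_Sudoku.py | getsubsudoku
-- ===== SOURCE A (Python) =====
-- def getsubsudoku(board, n):
--     # subsudoku:
--     #  1  2  3
--     #  4  5  6
--     #  7  8  9
--     # :rtype: list
--     if not (n <= 9 and n >= 1):
--         return None
--     ans = []
--     d = dict()
--     d.update({
--              1: [(i, j) for i in range(0, 3) for j in range(0, 3)],
--              2: [(i, j) for i in range(0, 3) for j in range(3, 6)],
--              3: [(i, j) for i in range(0, 3) for j in range(6, 9)],
--              4: [(i, j) for i in range(3, 6) for j in range(0, 3)],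
--              5: [(i, j) for i in range(3, 6) for j in range(3, 6)],
--              6: [(i, j) for i in range(3, 6) for j in range(6, 9)],
--              7: [(i, j) for i in range(6, 9) for j in range(0, 3)],
--              8: [(i, j) for i in range(6, 9) for j in range(3, 6)],
--              9: [(i, j) for i in range(6, 9) for j in range(6, 9)]
--              })
--     for i, j in d[n]:
--         ans.append(board[i][j])
--     return ans
-- ===== SOURCE B (Python) =====
-- def getsubsudoku(board, n):
--     # Simpler: compute the block's top-left corner arithmetically instead of a precomputed dict.
--     if not (1 <= n <= 9):
--         return None
--     r = ((n - 1) // 3) * 3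
--     c = ((n - 1) % 3) * 3
--     ans = []
--     for i in range(r, r + 3):
--         for j in range(c, c + 3):
--             ans.append(board[i][j])
--     return ans
-- ===== Notes on version B (the rewrite author's own statement) =====
-- stated objective: simpler
-- what changed: Replaces the per-call 9-entry precomputed coordinate dictionary and the single loop over its 9 looked-up pairs with direct arithmetic for the block corner (r=((n-1)//3)*3, c=((n-1)%3)*3) and two nested ranges over the 3x3 block.
import Mathlib
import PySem

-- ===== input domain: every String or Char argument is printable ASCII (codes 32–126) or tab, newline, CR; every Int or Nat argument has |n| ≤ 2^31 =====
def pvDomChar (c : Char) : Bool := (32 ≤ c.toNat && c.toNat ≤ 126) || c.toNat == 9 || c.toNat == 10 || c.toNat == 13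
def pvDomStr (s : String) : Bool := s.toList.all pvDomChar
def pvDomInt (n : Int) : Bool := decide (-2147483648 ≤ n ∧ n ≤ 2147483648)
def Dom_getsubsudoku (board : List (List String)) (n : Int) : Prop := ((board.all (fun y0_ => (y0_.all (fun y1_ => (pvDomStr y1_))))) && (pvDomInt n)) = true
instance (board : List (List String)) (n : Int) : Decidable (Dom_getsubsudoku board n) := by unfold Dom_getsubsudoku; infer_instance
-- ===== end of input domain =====

-- B replaces A's precomputed 9-entry coordinate dictionary with arithmetic for the block corner
-- and two nested ranges (objective: simpler). Equivalence is about return values on Pre_.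

-- ===== PORT A =====
-- helper: the comprehension [(i, j) for i in range(a, a+3) for j in range(b, b+3)]
def pvBlk (a b : Int) : List (Int × Int) :=
  (PySem.List.pyRange a (a + 3) 1).flatMap
    (fun i => (PySem.List.pyRange b (b + 3) 1).map (fun j => (i, j)))

def getsubsudoku (board : List (List String)) (n : Int) : Option (List String) :=
  if ¬ (n ≤ 9 ∧ 1 ≤ n) then none
  else
    let d : PySem.Dict Int (List (Int × Int)) :=
      ((((((((PySem.Dict.empty.insert 1 (pvBlk 0 0)).insert 2 (pvBlk 0 3)).insert 3
        (pvBlk 0 6)).insert 4 (pvBlk 3 0)).insert 5 (pvBlk 3 3)).insert 6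
        (pvBlk 3 6)).insert 7 (pvBlk 6 0)).insert 8 (pvBlk 6 3)).insert 9 (pvBlk 6 6)
    match d.get? n with
    | none => none  -- unreachable under the guard (KeyError in Python)
    | some prs =>
      prs.foldl
        (fun acc p =>
          acc.bind (fun l =>
            (PySem.List.pyGet? board p.1).bind (fun row =>
              (PySem.List.pyGet? row p.2).map (fun x => l ++ [x]))))
        (some [])

-- ===== PORT B =====
def getsubsudoku_alt (board : List (List String)) (n : Int) : Option (List String) :=
  if ¬ (1 ≤ n ∧ n ≤ 9) then none
  else
    let r := PySem.Int.floordiv (n - 1) 3 * 3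
    let c := PySem.Int.mod (n - 1) 3 * 3
    (PySem.List.pyRange r (r + 3) 1).foldl
      (fun acc i =>
        (PySem.List.pyRange c (c + 3) 1).foldl
          (fun acc2 j =>
            acc2.bind (fun l =>
              (PySem.List.pyGet? board i).bind (fun row =>
                (PySem.List.pyGet? row j).map (fun x => l ++ [x]))))
          acc)
      (some [])

-- ===== PRECONDITION & SPEC =====
-- Pre_ excludes exactly the inputs where Python A raises IndexError: 1 ≤ n ≤ 9 but
-- the board lacks some cell of block n.
def Pre_getsubsudoku (board : List (List String)) (n : Int) : Prop :=
  (1 ≤ n ∧ n ≤ 9) →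
    (3 * ((n - 1).toNat / 3) + 3 ≤ board.length ∧
     ∀ row ∈ (board.drop (3 * ((n - 1).toNat / 3))).take 3,
       3 * ((n - 1).toNat % 3) + 3 ≤ row.length)
instance (board : List (List String)) (n : Int) : Decidable (Pre_getsubsudoku board n) := by
  unfold Pre_getsubsudoku; infer_instance

def pvWitness_getsubsudoku : List (List String) × Int :=
  ([["1", "2", "3"], ["4", "5", "6"], ["7", "8", "9"]], 1)

def Spec_getsubsudoku (board : List (List String)) (n : Int) (out : Option (List String)) : Prop := out = getsubsudoku_alt board n
instance (board : List (List String)) (n : Int) (out : Option (List String)) : Decidable (Spec_getsubsudoku board n out) := by unfold Spec_getsubsudoku; infer_instance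

-- ===== CLAIM (what is proved, stated in full; the proofs are below) =====
def Claim_equal_getsubsudoku : Prop := ∀ (board : List (List String)) (n : Int), Dom_getsubsudoku board n → Pre_getsubsudoku board n → Spec_getsubsudoku board n (getsubsudoku board n)

-- ===== LEMMAS AND PROOFS =====

-- ===== VERDICT (by name: the statement is the Claim_ definition above) =====
theorem getsubsudoku_spec : Claim_equal_getsubsudoku := by
  intro board n _ _
  unfold Spec_getsubsudoku
  by_cases h : 1 ≤ n ∧ n ≤ 9
  · obtain ⟨h1, h2⟩ := h
    interval_cases n <;> rfl
  · simp only [getsubsudoku, getsubsudoku_alt]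
    rw [if_pos (by tauto), if_pos h]
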